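-- pv_equiv track=rewrite | github.com/dqk0902/DSA_2025 | week3/samebit.py | count
-- ===== SOURCE A (Python) =====
-- def count(s):
--     zeros = 0
--     ones = 0
--     for i in range(len(s)):
--         if s[i] == "0":
--             zeros += 1
--         if s[i] == "1":
--             ones += 1
--
--     zero_ways = zeros * (zeros - 1) // 2
--     ones_ways = ones * (ones - 1) // 2
--
--     return zero_ways + ones_ways
-- ===== SOURCE B (Python) =====
-- def count(s):
--     result = 0
--     zeros_seen = 0
--     ones_seen = 0
--     for ch in s:
--         if ch == "0":
--             result += zeros_seen
--             zeros_seen += 1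
--         elif ch == "1":
--             result += ones_seen
--             ones_seen += 1
--     return result
-- ===== Notes on version B (the rewrite author's own statement) =====
-- stated objective: alternative
-- what changed: B accumulates same-bit pairs incrementally in one pass (adding the number of equal bits seen so far at each character) instead of counting zeros/ones first and applying the n*(n-1)//2 combination formula; it also iterates characters directly rather than indexing s[i].
import Mathlib
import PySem

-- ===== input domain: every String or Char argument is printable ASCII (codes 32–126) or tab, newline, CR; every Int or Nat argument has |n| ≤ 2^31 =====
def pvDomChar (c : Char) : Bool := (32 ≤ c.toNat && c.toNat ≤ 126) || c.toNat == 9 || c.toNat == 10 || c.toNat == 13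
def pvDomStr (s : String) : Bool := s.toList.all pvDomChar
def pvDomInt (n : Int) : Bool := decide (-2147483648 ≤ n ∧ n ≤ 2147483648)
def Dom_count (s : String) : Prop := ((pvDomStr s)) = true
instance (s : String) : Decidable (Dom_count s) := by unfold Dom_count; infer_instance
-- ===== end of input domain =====

-- B changes the decomposition: one pass accumulating pairs on the fly instead of counting then applying n*(n-1)//2 (objective: alternative).

-- ===== PORT A =====
-- A scans the characters counting '0's and '1's, then combines with the formula.
def count (s : String) : Int :=
  let zo := s.toList.foldl
    (fun (p : Int × Int) c =>
      (if c = '0' then p.1 + 1 else p.1, if c = '1' then p.2 + 1 else p.2))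
    (0, 0)
  PySem.Int.floordiv (zo.1 * (zo.1 - 1)) 2 + PySem.Int.floordiv (zo.2 * (zo.2 - 1)) 2

-- ===== PORT B =====
-- B maintains (result, zeros_seen, ones_seen) and adds the equal bits seen so far.
def count_alt (s : String) : Int :=
  (s.toList.foldl
    (fun (st : Int × Int × Int) c =>
      if c = '0' then (st.1 + st.2.1, st.2.1 + 1, st.2.2)
      else if c = '1' then (st.1 + st.2.2, st.2.1, st.2.2 + 1)
      else st)
    (0, 0, 0)).1

-- ===== PRECONDITION & SPEC =====
def Spec_count (s : String) (out : Int) : Prop := out = count_alt s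
instance (s : String) (out : Int) : Decidable (Spec_count s out) := by unfold Spec_count; infer_instance

-- ===== CLAIM (what is proved, stated in full; the proofs are below) =====
def Claim_equal_count : Prop := ∀ (s : String), Dom_count s → Spec_count s (count s)

-- ===== LEMMAS AND PROOFS =====

def pvF (n : Int) : Int := PySem.Int.floordiv (n * (n - 1)) 2

theorem pvF_succ (z : Int) : pvF (z + 1) = pvF z + z := by
  unfold pvF
  rw [PySem.Int.floordiv_eq_ediv_of_pos (by norm_num : (0:Int) < 2),
      PySem.Int.floordiv_eq_ediv_of_pos (by norm_num : (0:Int) < 2)]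
  have h : (z + 1) * (z + 1 - 1) = z * (z - 1) + z * 2 := by ring
  rw [h, Int.add_mul_ediv_right _ _ (by norm_num : (2:Int) ≠ 0)]

theorem foldA_eq (l : List Char) (z o : Int) :
    l.foldl (fun (p : Int × Int) c =>
      (if c = '0' then p.1 + 1 else p.1, if c = '1' then p.2 + 1 else p.2)) (z, o)
    = (z + (l.count '0' : Int), o + (l.count '1' : Int)) := by
  induction l generalizing z o with
  | nil => simp
  | cons c t ih =>
      simp only [List.foldl_cons, ih, List.count_cons]
      by_cases h0 : c = '0' <;> by_cases h1 : c = '1' <;>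
        simp [h0, h1, Prod.ext_iff] <;> omega

theorem foldB_eq (l : List Char) (acc z o : Int) :
    (l.foldl (fun (st : Int × Int × Int) c =>
      if c = '0' then (st.1 + st.2.1, st.2.1 + 1, st.2.2)
      else if c = '1' then (st.1 + st.2.2, st.2.1, st.2.2 + 1)
      else st) (acc, z, o)).1
    = acc + (pvF (z + (l.count '0' : Int)) - pvF z)
          + (pvF (o + (l.count '1' : Int)) - pvF o) := by
  induction l generalizing acc z o with
  | nil => simp
  | cons c t ih =>
      simp only [List.foldl_cons, List.count_cons]
      by_cases h0 : c = '0'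
      · subst h0
        simp only [ih]
        simp
        have := pvF_succ z
        have hz : z + ((t.count '0' : Int) + 1) = (z + 1) + (t.count '0' : Int) := by ring
        rw [hz]
        omega
      · by_cases h1 : c = '1'
        · subst h1
          simp only [h0, ih]
          simp
          have := pvF_succ o
          have ho : o + ((t.count '1' : Int) + 1) = (o + 1) + (t.count '1' : Int) := by ring
          rw [ho]
          omega
        · simp [h0, h1, ih]

-- ===== VERDICT (by name: the statement is the Claim_ definition above) =====
theorem count_spec : Claim_equal_count := by
  intro s _
  unfold Spec_count count count_alt
  rw [foldA_eq, foldB_eq]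
  simp [pvF]
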